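-- pv_equiv track=rewrite | github.com/dhairyaahuja11-crypto/IAS_Calibration | ui/calibration/data_selection.py | _resolve_group_sample_type
-- ===== SOURCE A (Python) =====
-- def _resolve_group_sample_type(replicates):
--     """Resolve a single sample_type for an averaged replicate group."""
--     normalized_types = {
--         str(rep.get('sample_type', '')).strip().lower()
--         for rep in replicates
--         if str(rep.get('sample_type', '')).strip()
--     }
--
--     if 'validation' in normalized_types:
--         return 'validation'
--     if 'calibration' in normalized_types:
--         return 'calibration'
--     return None
-- ===== SOURCE B (Python) =====
-- def _resolve_group_sample_type(replicates):
--     rank = {'validation': 2, 'calibration': 1}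
--     best = max((rank.get(str(rep.get('sample_type', '')).strip().lower(), 0)
--                 for rep in replicates), default=0)
--     return (None, 'calibration', 'validation')[best]
-- ===== Notes on version B (the rewrite author's own statement) =====
-- stated objective: alternative
-- what changed: Replaces A's set comprehension plus two staged membership tests by a max-of-ranks reduction: each replicate's normalized type is mapped to a numeric priority (validation=2, calibration=1, other=0), the maximum is taken in one pass, and the result is decoded from a priority table.
import Mathlib
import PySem

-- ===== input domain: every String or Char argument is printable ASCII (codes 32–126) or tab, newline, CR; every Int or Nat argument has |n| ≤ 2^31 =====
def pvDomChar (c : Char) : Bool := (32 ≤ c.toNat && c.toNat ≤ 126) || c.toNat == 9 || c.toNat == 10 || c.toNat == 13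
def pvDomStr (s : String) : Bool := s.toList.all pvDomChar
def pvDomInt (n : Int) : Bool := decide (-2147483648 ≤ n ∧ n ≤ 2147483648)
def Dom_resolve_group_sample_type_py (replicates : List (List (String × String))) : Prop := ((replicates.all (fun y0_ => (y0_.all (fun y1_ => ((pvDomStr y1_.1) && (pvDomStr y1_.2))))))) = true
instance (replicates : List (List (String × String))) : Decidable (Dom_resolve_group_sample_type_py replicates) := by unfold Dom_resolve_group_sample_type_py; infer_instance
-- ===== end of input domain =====

-- B replaces A's set comprehension + staged membership tests by a max-of-ranks
-- reduction (validation=2, calibration=1, other=0) decoded from a priority table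
-- (objective: alternative; same cost).

-- ===== PORT A =====
def resolve_group_sample_type_py (replicates : List (List (String × String))) : Option String :=
  let normalized_types : PySem.Set String :=
    replicates.foldl (fun acc rep =>
      if PySem.Str.strip (((List.lookup "sample_type" rep).getD "")) ≠ "" then
        PySem.Set.add acc (PySem.Str.lower (PySem.Str.strip (((List.lookup "sample_type" rep).getD ""))))
      else acc) PySem.Set.empty
  if PySem.Set.contains normalized_types "validation" then some "validation"
  else if PySem.Set.contains normalized_types "calibration" then some "calibration"
  else none

-- ===== PORT B =====
-- rank.get(t, 0) for the two-entry dict of Source B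
def pvRank (t : String) : Nat :=
  if t = "validation" then 2 else if t = "calibration" then 1 else 0

def resolve_group_sample_type_py_alt (replicates : List (List (String × String))) : Option String :=
  -- best = max(generator, default=0)
  let best : Nat := replicates.foldl
    (fun b rep => max b (pvRank (PySem.Str.lower (PySem.Str.strip (((List.lookup "sample_type" rep).getD "")))))) 0
  -- (None, 'calibration', 'validation')[best]
  match best with
  | 0 => none
  | 1 => some "calibration"
  | _ => some "validation"

-- ===== PRECONDITION & SPEC =====
def Spec_resolve_group_sample_type_py (replicates : List (List (String × String))) (out : Option String) : Prop := out = resolve_group_sample_type_py_alt replicates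
instance (replicates : List (List (String × String))) (out : Option String) : Decidable (Spec_resolve_group_sample_type_py replicates out) := by unfold Spec_resolve_group_sample_type_py; infer_instance

-- ===== CLAIM =====
def Claim_equal_resolve_group_sample_type_py : Prop := ∀ (replicates : List (List (String × String))), Dom_resolve_group_sample_type_py replicates → Spec_resolve_group_sample_type_py replicates (resolve_group_sample_type_py replicates)

-- ===== LEMMAS AND PROOFS =====

-- the normalized type of one replicate
def pvT (rep : List (String × String)) : String :=
  PySem.Str.lower (PySem.Str.strip (((List.lookup "sample_type" rep).getD "")))

-- A's fold step (named only for the proofs)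
def pvStep (acc : PySem.Set String) (rep : List (String × String)) : PySem.Set String :=
  if PySem.Str.strip (((List.lookup "sample_type" rep).getD "")) ≠ "" then
    PySem.Set.add acc (pvT rep)
  else acc

lemma pvT_eq_of_strip_empty (rep : List (String × String))
    (h : PySem.Str.strip (((List.lookup "sample_type" rep).getD "")) = "") : pvT rep = "" := by
  unfold pvT; rw [h]; decide

lemma mem_foldl_pvStep (l : List (List (String × String))) (acc : PySem.Set String) (x : String)
    (hx : x ≠ "") :
    x ∈ l.foldl pvStep acc ↔ x ∈ acc ∨ ∃ rep ∈ l, pvT rep = x := by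
  induction l generalizing acc with
  | nil => simp
  | cons rep rest ih =>
    rw [List.foldl_cons, ih]
    by_cases hs : PySem.Str.strip (((List.lookup "sample_type" rep).getD "")) = ""
    · have h0 : pvStep acc rep = acc := by unfold pvStep; simp [hs]
      rw [h0]
      simp only [List.mem_cons]
      constructor
      · rintro (h | ⟨r, hr, ht⟩)
        · exact Or.inl h
        · exact Or.inr ⟨r, Or.inr hr, ht⟩
      · rintro (h | ⟨r, (rfl | hr), ht⟩)
        · exact Or.inl h
        · exact absurd (ht.symm.trans (pvT_eq_of_strip_empty r hs)) hx
        · exact Or.inr ⟨r, hr, ht⟩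
    · have h1 : pvStep acc rep = PySem.Set.add acc (pvT rep) := by unfold pvStep; simp [hs]
      rw [h1]
      simp only [List.mem_cons, PySem.Set.mem_add]
      constructor
      · rintro (⟨h | h⟩ | ⟨r, hr, ht⟩)
        · exact Or.inl h
        · exact Or.inr ⟨rep, Or.inl rfl, h.symm⟩
        · exact Or.inr ⟨r, Or.inr hr, ht⟩
      · rintro (h | ⟨r, (rfl | hr), ht⟩)
        · exact Or.inl (Or.inl h)
        · exact Or.inl (Or.inr ht.symm)
        · exact Or.inr ⟨r, hr, ht⟩

-- B's max fold, characterized by the two 'any' tests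
lemma foldl_max_rank (l : List (List (String × String))) (b : Nat) :
    l.foldl (fun b rep => max b (pvRank (pvT rep))) b =
      if l.any (fun rep => pvT rep == "validation") then max b 2
      else if l.any (fun rep => pvT rep == "calibration") then max b 1
      else b := by
  induction l generalizing b with
  | nil => simp
  | cons rep rest ih =>
    simp only [List.foldl_cons, List.any_cons, ih]
    by_cases hv : pvT rep = "validation" <;> by_cases hc : pvT rep = "calibration" <;>
      simp [pvRank, hv, hc]

-- ===== VERDICT =====
theorem resolve_group_sample_type_py_spec : Claim_equal_resolve_group_sample_type_py := by
  intro replicates _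
  unfold Spec_resolve_group_sample_type_py
  have hmemV := mem_foldl_pvStep replicates PySem.Set.empty "validation" (by decide)
  have hmemC := mem_foldl_pvStep replicates PySem.Set.empty "calibration" (by decide)
  have hA : resolve_group_sample_type_py replicates =
      (if replicates.any (fun rep => pvT rep == "validation") then some "validation"
       else if replicates.any (fun rep => pvT rep == "calibration") then some "calibration"
       else none) := by
    unfold resolve_group_sample_type_py
    show (if PySem.Set.contains (List.foldl pvStep PySem.Set.empty replicates) "validation" = true
            then some "validation"
          else if PySem.Set.contains (List.foldl pvStep PySem.Set.empty replicates) "calibration" = true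
            then some "calibration"
          else none) = _
    have cV : PySem.Set.contains (List.foldl pvStep PySem.Set.empty replicates) "validation" =
        replicates.any (fun rep => pvT rep == "validation") := by
      by_cases hv : replicates.any (fun rep => pvT rep == "validation")
      · have hm : "validation" ∈ List.foldl pvStep PySem.Set.empty replicates := by
          rw [hmemV]
          exact Or.inr (by simpa only [List.any_eq_true, beq_iff_eq] using hv)
        simp only [PySem.Set.empty] at hm
        simp [hm, hv]
      · have hm : "validation" ∉ List.foldl pvStep PySem.Set.empty replicates := by
          rw [hmemV]
          rintro (h | h)
          · simp [PySem.Set.empty] at h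
          · exact hv (by simpa only [List.any_eq_true, beq_iff_eq] using h)
        simp only [PySem.Set.empty] at hm
        simp [hm, hv]
    have cC : PySem.Set.contains (List.foldl pvStep PySem.Set.empty replicates) "calibration" =
        replicates.any (fun rep => pvT rep == "calibration") := by
      by_cases hc : replicates.any (fun rep => pvT rep == "calibration")
      · have hm : "calibration" ∈ List.foldl pvStep PySem.Set.empty replicates := by
          rw [hmemC]
          exact Or.inr (by simpa only [List.any_eq_true, beq_iff_eq] using hc)
        simp only [PySem.Set.empty] at hm
        simp [hm, hc]
      · have hm : "calibration" ∉ List.foldl pvStep PySem.Set.empty replicates := by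
          rw [hmemC]
          rintro (h | h)
          · simp [PySem.Set.empty] at h
          · exact hc (by simpa only [List.any_eq_true, beq_iff_eq] using h)
        simp only [PySem.Set.empty] at hm
        simp [hm, hc]
    rw [cV, cC]
  have hB : resolve_group_sample_type_py_alt replicates =
      (if replicates.any (fun rep => pvT rep == "validation") then some "validation"
       else if replicates.any (fun rep => pvT rep == "calibration") then some "calibration"
       else none) := by
    unfold resolve_group_sample_type_py_alt
    show (match List.foldl (fun b rep => max b (pvRank (pvT rep))) 0 replicates with
          | 0 => none
          | 1 => some "calibration"
          | _ => some "validation") = _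
    rw [foldl_max_rank]
    by_cases hv : replicates.any (fun rep => pvT rep == "validation") <;>
      by_cases hc : replicates.any (fun rep => pvT rep == "calibration") <;>
      simp [hv, hc]
  rw [hA, hB]
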